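-- pv_equiv track=rewrite | github.com/haejun-kim/Algorithm | boj/2231_분해합.py | solve
-- ===== SOURCE A (Python) =====
-- def solve(n):
--     result = float("inf")
--
--     for i in range(1, n + 1):
--         num_list = []
--         num_list.append(i)
--         for num in str(i):
--             num_list.append(int(num))
--
--         if sum(num_list) == n:
--             result = min(result, num_list[0])
--
--             return result
--
--     return 0
-- ===== SOURCE B (Python) =====
-- def solve(n):
--     # The digit sum of any candidate i <= 2**31 is at most 90, so a generator of n
--     # must lie in the window [n-100, n]; scan only that window instead of 1..n.
--     lo = n - 100 if n - 100 > 1 else 1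
--     for i in range(lo, n + 1):
--         if i + sum(int(c) for c in str(i)) == n:
--             return i
--     return 0
-- ===== Notes on version B (the rewrite author's own statement) =====
-- stated objective: faster
-- what changed: Instead of scanning every candidate from 1 to n, B scans only the window [n-100, n], valid because the digit sum of any i <= 2^31 is at most 90, so any generator of n lies in that window.
import Mathlib
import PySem

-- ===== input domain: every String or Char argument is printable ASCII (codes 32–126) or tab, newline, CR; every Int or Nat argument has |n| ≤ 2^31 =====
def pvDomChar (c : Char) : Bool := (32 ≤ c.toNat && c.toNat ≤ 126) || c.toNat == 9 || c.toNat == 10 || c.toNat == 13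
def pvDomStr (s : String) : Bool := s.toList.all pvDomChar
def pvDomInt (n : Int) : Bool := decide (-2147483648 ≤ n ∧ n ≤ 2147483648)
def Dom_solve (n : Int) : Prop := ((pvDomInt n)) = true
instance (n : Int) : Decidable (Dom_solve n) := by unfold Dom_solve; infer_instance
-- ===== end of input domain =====

-- B scans only the window [n-100, n] (any generator i of n satisfies i >= n - digitsum(i) >= n - 90): asymptotically faster than A's scan from 1.


-- ===== PORT A =====
-- int(num) for the one-character string num (never a ValueError here: str(i) of a
-- nonnegative i consists of decimal digit characters)
def pyCharInt (c : Char) : Int := (PySem.Int.ofChars? [c]).getD 0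

-- the body of A's for-loop over range(1, n+1); `min(float("inf"), num_list[0])`
-- is `num_list[0]` (the float infinity is never returned)
def solveLoop (n : Int) : List Int → Int
  | [] => 0
  | i :: rest =>
      let numList : List Int := [i] ++ (PySem.Int.toStr i).toList.map pyCharInt
      if numList.sum = n then (PySem.List.pyGet? numList 0).getD 0
      else solveLoop n rest

def solve (n : Int) : Int := solveLoop n (PySem.List.pyRange 1 (n + 1) 1)

-- ===== PORT B =====
-- sum(int(c) for c in str(i))
def solveAltDigitSum (i : Int) : Int :=
  ((PySem.Int.toStr i).toList.map pyCharInt).sum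

def solveAltLoop (n : Int) : List Int → Int
  | [] => 0
  | i :: rest =>
      if i + solveAltDigitSum i = n then i else solveAltLoop n rest

def solve_alt (n : Int) : Int :=
  let lo : Int := if n - 100 > 1 then n - 100 else 1
  solveAltLoop n (PySem.List.pyRange lo (n + 1) 1)

-- ===== PRECONDITION & SPEC =====
def Spec_solve (n : Int) (out : Int) : Prop := out = solve_alt n
instance (n : Int) (out : Int) : Decidable (Spec_solve n out) := by unfold Spec_solve; infer_instance

-- ===== CLAIM (what is proved, stated in full; the proofs are below) =====
def Claim_equal_solve : Prop := ∀ (n : Int), Dom_solve n → Spec_solve n (solve n)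

-- ===== LEMMAS AND PROOFS =====

-- the two loop bodies compute the same thing on the same list
lemma loop_eq (n : Int) (l : List Int) : solveLoop n l = solveAltLoop n l := by
  induction l with
  | nil => rfl
  | cons i rest ih =>
      simp only [solveLoop, solveAltLoop, List.cons_append, List.nil_append, List.sum_cons]
      by_cases h : i + ((PySem.Int.toStr i).toList.map pyCharInt).sum = n
      · rw [if_pos h, if_pos (by simpa [solveAltDigitSum] using h)]
        simp [PySem.List.pyGet?, PySem.List.pyIdx?]
      · rw [if_neg h, if_neg (by simpa [solveAltDigitSum] using h), ih]

-- every character produced by Nat.toDigitsCore is from the accumulator or a digitChar of a value < 10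
lemma mem_toDigitsCore (f : Nat) :
    ∀ (n : Nat) (acc : List Char) (c : Char), c ∈ Nat.toDigitsCore 10 f n acc →
      c ∈ acc ∨ ∃ k, k < 10 ∧ c = Nat.digitChar k := by
  induction f with
  | zero => intro n acc c h; exact Or.inl h
  | succ f ih =>
      intro n acc c h
      simp only [Nat.toDigitsCore] at h
      by_cases hz : n / 10 = 0
      · rw [if_pos hz] at h
        rcases List.mem_cons.mp h with h | h
        · exact Or.inr ⟨n % 10, Nat.mod_lt _ (by norm_num), h⟩
        · exact Or.inl h
      · rw [if_neg hz] at h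
        rcases ih (n / 10) (Nat.digitChar (n % 10) :: acc) c h with h | h
        · rcases List.mem_cons.mp h with h | h
          · exact Or.inr ⟨n % 10, Nat.mod_lt _ (by norm_num), h⟩
          · exact Or.inl h
        · exact Or.inr h

lemma pyCharInt_digitChar (k : Nat) (hk : k < 10) : pyCharInt (Nat.digitChar k) = (k : Int) := by
  interval_cases k <;> decide

-- digit sum of any 0 ≤ i < 10^10 is at most 90
lemma dsum_le (i : Int) (h0 : 0 ≤ i) (h1 : i < 10 ^ 10) : solveAltDigitSum i ≤ 90 := by
  unfold solveAltDigitSum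
  rw [PySem.Int.toList_toStr]
  have hch : PySem.Int.toChars i = Nat.toDigits 10 i.toNat := by
    unfold PySem.Int.toChars
    rw [if_neg (by omega)]
  rw [hch]
  have hlen : (Nat.toDigits 10 i.toNat).length ≤ 10 := by
    apply Nat.toDigits_length 10 i.toNat 10 (by norm_num)
    have : i.toNat < 10 ^ 10 := by omega
    simpa using this
  have hbound : ∀ x ∈ (Nat.toDigits 10 i.toNat).map pyCharInt, x ≤ (9 : Int) := by
    intro x hx
    rcases List.mem_map.mp hx with ⟨c, hc, rfl⟩
    rcases mem_toDigitsCore _ _ _ _ hc with h | ⟨k, hk, rfl⟩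
    · simp at h
    · rw [pyCharInt_digitChar k hk]; omega
  have := List.sum_le_card_nsmul _ _ hbound
  have hlen2 : ((Nat.toDigits 10 i.toNat).map pyCharInt).length ≤ 10 := by
    simpa using hlen
  have : ((Nat.toDigits 10 i.toNat).map pyCharInt).sum
      ≤ (((Nat.toDigits 10 i.toNat).map pyCharInt).length : Int) * 9 := by
    simpa [nsmul_eq_mul] using this
  nlinarith

-- skipping a prefix on which the test fails does not change the result
lemma loop_append (n : Int) (l1 l2 : List Int)
    (h : ∀ i ∈ l1, ¬ (i + solveAltDigitSum i = n)) :
    solveAltLoop n (l1 ++ l2) = solveAltLoop n l2 := by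
  induction l1 with
  | nil => rfl
  | cons i rest ih =>
      simp only [List.cons_append, solveAltLoop]
      rw [if_neg (h i (List.mem_cons_self ..))]
      exact ih (fun j hj => h j (List.mem_cons_of_mem _ hj))

-- ===== VERDICT (by name: the statement is the Claim_ definition above) =====
theorem solve_spec : Claim_equal_solve := by
  intro n hdom
  have hn : n ≤ 2147483648 := by
    unfold Dom_solve pvDomInt at hdom
    simp only [decide_eq_true_eq] at hdom
    exact hdom.2
  unfold Spec_solve solve solve_alt
  rw [loop_eq]
  by_cases h : n - 100 > 1
  · rw [if_pos h]
    rw [PySem.List.pyRange_one_append 1 (n - 100) (n + 1) (by omega) (by omega)]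
    apply loop_append
    intro i hi
    rw [PySem.List.mem_pyRange_one] at hi
    have hds : solveAltDigitSum i ≤ 90 := dsum_le i (by omega) (by norm_num; omega)
    omega
  · rw [if_neg h]
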